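-- pv_equiv track=rewrite | github.com/michaelcrichlow/2024_11_06---isStrongNumber | test_02.py | isStrongNumber
-- ===== SOURCE A (Python) =====
-- def get_factorial(n: int) -> int:
--     total = 1
--     for val in range(1, n + 1):
--         total *= val
--
--     return total
--
-- def isStrongNumber(n: int) -> bool:
--     _n = n
--     div, mod = 1_000, 0
--     total = 0
--
--     while div > 0:
--         div, mod = divmod(_n, 10)
--         factorial_of_mod = get_factorial(mod)
--         total += factorial_of_mod
--         _n = div
--
--     return total == n
-- ===== SOURCE B (Python) =====
-- _FACT = [1, 1, 2, 6, 24, 120, 720, 5040, 40320, 362880]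
--
-- def isStrongNumber(n: int) -> bool:
--     # idiomatic: iterate the digits of str(abs(n)) with a factorial lookup table
--     return sum(_FACT[int(d)] for d in str(abs(n))) == n
-- ===== Notes on version B (the rewrite author's own statement) =====
-- stated objective: idiomatic
-- what changed: B sums factorials looked up in a precomputed factorial table over the digit characters of str(abs(n)) in one expression, instead of A's while-loop peeling digits with divmod and recomputing each factorial with an inner product loop.
import Mathlib
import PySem

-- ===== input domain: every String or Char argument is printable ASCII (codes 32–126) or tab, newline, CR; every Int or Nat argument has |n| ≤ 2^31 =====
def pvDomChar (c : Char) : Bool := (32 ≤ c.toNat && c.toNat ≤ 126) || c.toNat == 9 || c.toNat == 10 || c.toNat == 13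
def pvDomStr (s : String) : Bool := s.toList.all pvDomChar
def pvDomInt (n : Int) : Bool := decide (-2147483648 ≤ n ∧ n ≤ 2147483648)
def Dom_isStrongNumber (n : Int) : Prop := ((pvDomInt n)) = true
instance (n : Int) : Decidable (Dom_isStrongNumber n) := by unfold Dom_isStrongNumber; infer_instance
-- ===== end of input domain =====

-- B replaces A's divmod digit-peeling loop with inner factorial loops by a one-line sum of
-- factorials looked up in a precomputed table over the digit characters of str(abs(n)) (objective: idiomatic).

-- ===== PORT A =====
-- get_factorial: total = 1; for val in range(1, n+1): total *= val
def getFactorial (n : Int) : Int :=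
  (PySem.List.pyRange 1 (n + 1) 1).foldl (fun total val => total * val) 1

-- the while loop: body always runs once (div starts at 1000 > 0), then repeats while the new div > 0
def isStrongNumberLoop (m : Int) (total : Int) : Int :=
  let div := PySem.Int.floordiv m 10
  let md  := PySem.Int.mod m 10
  let total' := total + getFactorial md
  if h : div > 0 then isStrongNumberLoop div total' else total'
termination_by m.natAbs
decreasing_by
  have h10 : (10 : Int) ≤ m := by
    have := (PySem.Int.le_floordiv_iff_mul_le (a := m) (b := 10) (q := 1) (by omega)).mp (by omega)
    omega
  have hle : PySem.Int.floordiv m 10 ≤ PySem.Int.floordiv m 10 * 10 - 9 := by omega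
  have hdm := PySem.Int.floordiv_mul_add_mod m 10
  have hmlt := PySem.Int.mod_lt m (b := 10) (by omega)
  have hmnn := PySem.Int.mod_nonneg m (b := 10) (by omega)
  omega

def isStrongNumber (n : Int) : Bool :=
  decide (isStrongNumberLoop n 0 = n)

-- ===== PORT B =====
def pvFACT : List Int := [1, 1, 2, 6, 24, 120, 720, 5040, 40320, 362880]

-- sum(_FACT[int(d)] for d in str(abs(n))) == n ; `int(d)` for a single digit character is
-- exactly (d.toNat - 48 : Int), and the list index is always in range (digits of str(abs n))
def isStrongNumber_alt (n : Int) : Bool :=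
  decide ((((PySem.Int.toChars |n|).map
      (fun d => PySem.List.pyGetD pvFACT ((d.toNat : Int) - 48) 0)).sum : Int) = n)

-- ===== PRECONDITION & SPEC =====
def Spec_isStrongNumber (n : Int) (out : Bool) : Prop := out = isStrongNumber_alt n
instance (n : Int) (out : Bool) : Decidable (Spec_isStrongNumber n out) := by unfold Spec_isStrongNumber; infer_instance

-- ===== CLAIM (what is proved, stated in full; the proofs are below) =====
def Claim_equal_isStrongNumber : Prop := ∀ (n : Int), Dom_isStrongNumber n → Spec_isStrongNumber n (isStrongNumber n)

-- ===== LEMMAS AND PROOFS =====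

-- reference digit-factorial sum, shared target of both ports for m ≥ 0
def pvF (m : Nat) : Int :=
  if m < 10 then (Nat.factorial m : Int) else pvF (m / 10) + (Nat.factorial (m % 10) : Int)
termination_by m
decreasing_by omega

theorem pvF_pos (m : Nat) : 1 ≤ pvF m := by
  induction m using Nat.strong_induction_on with
  | _ m ih =>
    rw [pvF]
    split
    · exact_mod_cast Nat.one_le_iff_ne_zero.mpr (Nat.factorial_ne_zero m)
    · have h1 := ih (m / 10) (by omega)
      have h2 : 1 ≤ ((Nat.factorial (m % 10) : Int)) := by
        exact_mod_cast Nat.one_le_iff_ne_zero.mpr (Nat.factorial_ne_zero _)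
      omega

theorem getFactorial_natCast (k : Nat) : getFactorial (k : Int) = (Nat.factorial k : Int) := by
  induction k with
  | zero => decide
  | succ k ih =>
    unfold getFactorial at *
    have h2 : ((k + 1 : Nat) : Int) + 1 = ((k : Int) + 1) + 1 := by push_cast; ring
    rw [h2, PySem.List.pyRange_one_succ_right (by omega), List.foldl_append]
    simp only [List.foldl, ih, Nat.factorial_succ]
    push_cast; ring

theorem loop_eq_pvF (m : Nat) (t : Int) : isStrongNumberLoop (m : Int) t = t + pvF m := by
  induction m using Nat.strong_induction_on generalizing t with
  | _ m ih =>
    rw [isStrongNumberLoop]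
    have hd : PySem.Int.floordiv (m : Int) 10 = ((m / 10 : Nat) : Int) := by
      exact_mod_cast PySem.Int.floordiv_natCast m 10
    have hmo : PySem.Int.mod (m : Int) 10 = ((m % 10 : Nat) : Int) := by
      exact_mod_cast PySem.Int.mod_natCast m 10
    simp only [hd, hmo, getFactorial_natCast]
    split
    · rename_i h
      have hm : ¬ m < 10 := by
        intro hlt
        have hz : m / 10 = 0 := by omega
        rw [hz] at h
        exact absurd h (by norm_num)
      rw [ih (m / 10) (by omega)]
      conv_rhs => rw [pvF]
      rw [if_neg hm]
      ring
    · rename_i h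
      have hm : m < 10 := by
        by_contra hge
        have h1 : 1 ≤ m / 10 := Nat.one_le_div_iff (by omega) |>.mpr (by omega)
        exact h (by exact_mod_cast h1)
      have hmod : m % 10 = m := Nat.mod_eq_of_lt hm
      conv_rhs => rw [pvF]
      rw [if_pos hm, hmod]

-- the B-side digit map applied to a digit character is its factorial
theorem digit_map_fact (d : Nat) (hd : d < 10) :
    PySem.List.pyGetD pvFACT ((Nat.digitChar d).toNat - 48 : Int) 0 = (Nat.factorial d : Int) := by
  interval_cases d <;> decide

theorem toDigitsCore_sum (fuel m : Nat) (ds : List Char) (hf : m < fuel) :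
    ((Nat.toDigitsCore 10 fuel m ds).map
        (fun d => PySem.List.pyGetD pvFACT ((d.toNat : Int) - 48) 0)).sum
      = pvF m + ((ds.map (fun d => PySem.List.pyGetD pvFACT ((d.toNat : Int) - 48) 0)).sum) := by
  induction fuel generalizing m ds with
  | zero => omega
  | succ f ih =>
    rw [Nat.toDigitsCore]
    have hdig := digit_map_fact (m % 10) (Nat.mod_lt _ (by omega))
    split
    · rename_i h
      have hm : m < 10 := by omega
      have hmod : m % 10 = m := Nat.mod_eq_of_lt hm
      conv_rhs => rw [pvF]
      rw [if_pos hm]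
      rw [hmod] at hdig
      simp only [List.map_cons, List.sum_cons, hmod, hdig]
    · rename_i h
      have hm : ¬ m < 10 := by
        intro hlt
        exact h (by omega)
      rw [ih (m / 10) _ (by omega)]
      conv_rhs => rw [pvF]
      rw [if_neg hm]
      simp only [List.map_cons, List.sum_cons, hdig]
      ring

theorem alt_sum_eq_pvF (m : Nat) :
    (((PySem.Int.toChars (m : Int)).map
        (fun d => PySem.List.pyGetD pvFACT ((d.toNat : Int) - 48) 0)).sum : Int) = pvF m := by
  have h1 : PySem.Int.toChars (m : Int) = Nat.toDigits 10 m := by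
    simp [PySem.Int.toChars]
  rw [h1, Nat.toDigits, toDigitsCore_sum (m + 1) m [] (by omega)]
  simp

-- for negative n the loop body runs exactly once and yields a positive total
theorem loop_neg (n : Int) (hn : n < 0) : 1 ≤ isStrongNumberLoop n 0 := by
  rw [isStrongNumberLoop]
  have hdm := PySem.Int.floordiv_mul_add_mod n 10
  have hmlt := PySem.Int.mod_lt n (b := 10) (by omega)
  have hmnn := PySem.Int.mod_nonneg n (b := 10) (by omega)
  have hdiv : ¬ PySem.Int.floordiv n 10 > 0 := by omega
  simp only [hdiv, dite_false]
  have : PySem.Int.mod n 10 = ((PySem.Int.mod n 10).toNat : Int) := by omega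
  rw [this, getFactorial_natCast]
  have := Nat.one_le_iff_ne_zero.mpr (Nat.factorial_ne_zero (PySem.Int.mod n 10).toNat)
  omega

-- ===== VERDICT (by name: the statement is the Claim_ definition above) =====
theorem isStrongNumber_spec : Claim_equal_isStrongNumber := by
  intro n _
  unfold Spec_isStrongNumber isStrongNumber isStrongNumber_alt
  by_cases hn : 0 ≤ n
  · have habs : |n| = ((n.toNat : Nat) : Int) := by
      rw [abs_of_nonneg hn]; omega
    rw [habs, alt_sum_eq_pvF]
    have hloop : isStrongNumberLoop n 0 = pvF n.toNat := by
      conv_lhs => rw [show n = ((n.toNat : Nat) : Int) by omega]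
      rw [loop_eq_pvF]; simp
    rw [hloop]
  · push_neg at hn
    have hpos := loop_neg n hn
    have hA : isStrongNumberLoop n 0 ≠ n := by omega
    have habs : |n| = (((-n).toNat : Nat) : Int) := by
      rw [abs_of_neg hn]; omega
    have hB : (((PySem.Int.toChars |n|).map
        (fun d => PySem.List.pyGetD pvFACT ((d.toNat : Int) - 48) 0)).sum : Int) ≠ n := by
      rw [habs, alt_sum_eq_pvF]
      have := pvF_pos (-n).toNat
      omega
    simp [hA, hB]
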